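-- pv_equiv track=rewrite | github.com/JasonFruit/olpbhtb-app | data.py | parse_terms
-- ===== SOURCE A (Python) =====
-- def parse_terms(term_str):
--     in_str = False
--     acc = ""
--     terms = []
--
--     for c in term_str:
--         if c == " " and not in_str:
--             terms.append(acc)
--             acc = ""
--         elif c == '"':
--             if in_str:
--                 terms.append(acc.lower())
--                 acc = ""
--                 in_str = False
--             else:
--                 in_str = True
--         else:
--             acc += c
--
--     if acc != "":
--         terms.append(acc)
--         acc = ""
--
--     return terms
-- ===== SOURCE B (Python) =====
-- def parse_terms(term_str):
--     terms = []
--     acc = []            # pending characters/slices, joined when flushed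
--     i = 0
--     n = len(term_str)
--     while i < n:
--         c = term_str[i]
--         if c == '"':
--             j = term_str.find('"', i + 1)
--             if j == -1:
--                 acc.append(term_str[i + 1:])
--                 i = n
--             else:
--                 acc.append(term_str[i + 1:j])
--                 terms.append("".join(acc).lower())
--                 acc = []
--                 i = j + 1
--         elif c == " ":
--             terms.append("".join(acc))
--             acc = []
--             i += 1
--         else:
--             acc.append(c)
--             i += 1
--     if acc and "".join(acc) != "":
--         terms.append("".join(acc))
--     return terms
-- ===== Notes on version B (the rewrite author's own statement) =====
-- stated objective: alternative
-- what changed: Replaced the per-character in_str flag state machine with an index-based while loop that, on a quote, looks ahead with str.find and consumes the whole quoted region via slicing in one step.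
import Mathlib
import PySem

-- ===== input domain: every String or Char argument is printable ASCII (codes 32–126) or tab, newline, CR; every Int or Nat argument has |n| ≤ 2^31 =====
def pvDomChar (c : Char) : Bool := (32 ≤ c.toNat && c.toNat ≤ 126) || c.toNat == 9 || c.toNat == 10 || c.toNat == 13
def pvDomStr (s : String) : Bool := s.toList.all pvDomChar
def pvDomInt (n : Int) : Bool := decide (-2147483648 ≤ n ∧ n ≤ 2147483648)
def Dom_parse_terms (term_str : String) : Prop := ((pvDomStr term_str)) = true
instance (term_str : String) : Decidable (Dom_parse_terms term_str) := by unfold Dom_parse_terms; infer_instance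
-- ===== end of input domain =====

-- B rewrites A's per-character in_str state machine as an index/lookahead loop that consumes
-- quoted regions in one slice; same values on every input (alternative decomposition, no speed claim).

-- ===== PORT A =====
-- A's for-loop over the characters with state (in_str, acc, terms); acc and terms kept as char lists.
def parseA : List Char → Bool → List Char → List (List Char) → Bool × List Char × List (List Char)
  | [], instr, acc, terms => (instr, acc, terms)
  | c :: cs, instr, acc, terms =>
    if c = ' ' ∧ instr = false then parseA cs instr [] (terms ++ [acc])
    else if c = '"' then
      if instr then parseA cs false [] (terms ++ [PySem.Chars.lower acc])
      else parseA cs true acc terms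
    else parseA cs instr (acc ++ [c]) terms

-- the code after A's loop: append acc if nonempty
def finishA (st : Bool × List Char × List (List Char)) : List (List Char) :=
  if st.2.1 ≠ [] then st.2.2 ++ [st.2.1] else st.2.2

def parse_terms (term_str : String) : List String :=
  (finishA (parseA term_str.toList false [] [])).map String.ofList

-- ===== PORT B =====
-- B's while loop over indices; term_str.find('"', i+1) and the slices become
-- takeWhile/dropWhile on the remaining characters (exact: find scans for the next '"').
def parseB : List Char → List Char → List (List Char) → List (List Char)
  | [], acc, terms => if acc ≠ [] then terms ++ [acc] else terms
  | c :: cs, acc, terms =>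
    if c = '"' then
      match h : cs.dropWhile (· ≠ '"') with
      | [] =>  -- no closing quote: j == -1, acc += rest, loop ends, final flush
        if acc ++ cs ≠ [] then terms ++ [acc ++ cs] else terms
      | _ :: post =>  -- closing quote found at j
        parseB post [] (terms ++ [PySem.Chars.lower (acc ++ cs.takeWhile (· ≠ '"'))])
    else if c = ' ' then parseB cs [] (terms ++ [acc])
    else parseB cs (acc ++ [c]) terms
termination_by cs _ _ => cs.length
decreasing_by
  · have h' := List.length_dropWhile_le (p := (· ≠ '"')) (l := cs)
    rw [h] at h'; simp at h' ⊢; omega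
  · simp
  · simp

def parse_terms_alt (term_str : String) : List String :=
  (parseB term_str.toList [] []).map String.ofList

-- ===== PRECONDITION & SPEC =====
def Spec_parse_terms (term_str : String) (out : List String) : Prop := out = parse_terms_alt term_str
instance (term_str : String) (out : List String) : Decidable (Spec_parse_terms term_str out) := by unfold Spec_parse_terms; infer_instance

-- ===== CLAIM (what is proved, stated in full; the proofs are below) =====
def Claim_equal_parse_terms : Prop := ∀ (term_str : String), Dom_parse_terms term_str → Spec_parse_terms term_str (parse_terms term_str)

-- ===== LEMMAS AND PROOFS =====

-- inside a quote with no closing quote: A just accumulates everything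
lemma parseA_instr_noquote (cs : List Char) (h : '"' ∉ cs) :
    ∀ acc terms, parseA cs true acc terms = (true, acc ++ cs, terms) := by
  induction cs with
  | nil => intro acc terms; simp [parseA]
  | cons c cs ih =>
    intro acc terms
    have hc : c ≠ '"' := by intro hc; exact h (hc ▸ List.mem_cons_self)
    have hcs : '"' ∉ cs := fun hm => h (List.mem_cons_of_mem _ hm)
    simp [parseA, hc, ih hcs]
    -- (hc rules out the quote branch)

-- inside a quote with a closing quote: A accumulates pre, flushes lowered, leaves the quote
lemma parseA_instr_quote (pre : List Char) (h : '"' ∉ pre) :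
    ∀ post acc terms, parseA (pre ++ '"' :: post) true acc terms
      = parseA post false [] (terms ++ [PySem.Chars.lower (acc ++ pre)]) := by
  induction pre with
  | nil => intro post acc terms; simp [parseA]
  | cons c pre ih =>
    intro post acc terms
    have hc : c ≠ '"' := by intro hc; exact h (hc ▸ List.mem_cons_self)
    have hpre : '"' ∉ pre := fun hm => h (List.mem_cons_of_mem _ hm)
    simp only [List.cons_append, parseA]
    rw [if_neg (by simp [hc]), if_neg hc, ih hpre]  -- hc: c not a quote
    simp

lemma main_lemma : ∀ cs acc terms, finishA (parseA cs false acc terms) = parseB cs acc terms := by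
  have H : ∀ n (cs : List Char), cs.length ≤ n →
      ∀ acc terms, finishA (parseA cs false acc terms) = parseB cs acc terms := by
    intro n
    induction n with
    | zero =>
      intro cs hcs acc terms
      have : cs = [] := by
        cases cs with
        | nil => rfl
        | cons c cs => simp at hcs
      subst this
      simp [parseA, parseB, finishA]
    | succ n ih =>
      intro cs hcs acc terms
      match cs with
      | [] => simp [parseA, parseB, finishA]
      | c :: cs =>
        by_cases hq : c = '"'
        · subst hq
          have hA : parseA ('"' :: cs) false acc terms = parseA cs true acc terms := by
            simp [parseA]
          rw [hA, parseB]
          rw [if_pos rfl]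
          split
          · -- no closing quote in cs
            rename_i heq
            have hnq : '"' ∉ cs := by
              intro hm
              have := (List.dropWhile_eq_nil_iff.mp heq) _ hm
              simp at this
            rw [parseA_instr_noquote cs hnq]
            simp [finishA]
          · -- closing quote found
            rename_i q post heq
            have hne : cs.dropWhile (fun x => decide (x ≠ '"')) ≠ [] := by rw [heq]; simp
            have hqq : q = '"' := by
              have h2 := List.head_dropWhile_not (fun x => decide (x ≠ '"')) hne
              simp only [heq, List.head_cons] at h2
              simpa using h2
            have hsplit : cs.takeWhile (fun x => decide (x ≠ '"')) ++ '"' :: post = cs := by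
              conv_rhs => rw [← List.takeWhile_append_dropWhile
                (p := fun x => decide (x ≠ '"')) (l := cs)]
              rw [heq, hqq]
            have hnp : '"' ∉ cs.takeWhile (fun x => decide (x ≠ '"')) := by
              intro hm
              have := List.mem_takeWhile_imp hm
              simp at this
            have hlen : post.length ≤ n := by
              have hl : (cs.takeWhile (fun x => decide (x ≠ '"')) ++ '"' :: post).length
                  = cs.length := by rw [hsplit]
              simp at hl hcs
              omega
            have hstep : parseA cs true acc terms
                = parseA post false []
                    (terms ++ [PySem.Chars.lower
                      (acc ++ cs.takeWhile (fun x => decide (x ≠ '"')))]) := by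
              conv_lhs => rw [← hsplit]
              rw [parseA_instr_quote _ hnp]
            rw [hstep, ih _ hlen]
        · by_cases hs : c = ' '
          · subst hs
            have hA : parseA (' ' :: cs) false acc terms = parseA cs false [] (terms ++ [acc]) := by
              simp [parseA]
            rw [hA, parseB]
            simp only [if_neg (by decide : ¬ (' ' = '"')), if_pos rfl]
            exact ih _ (by simpa using hcs) _ _
          · have hA : parseA (c :: cs) false acc terms = parseA cs false (acc ++ [c]) terms := by
              simp [parseA, hs, hq]
            rw [hA, parseB]
            rw [if_neg hq, if_neg hs]
            exact ih _ (by simpa using hcs) _ _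
  intro cs acc terms
  exact H cs.length cs le_rfl acc terms

-- ===== VERDICT (by name: the statement is the Claim_ definition above) =====
theorem parse_terms_spec : Claim_equal_parse_terms := by
  intro s _
  unfold Spec_parse_terms parse_terms parse_terms_alt
  rw [main_lemma]
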